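-- pv_equiv track=rewrite | github.com/KennethSidibe/RoomBookZoom | TextBot.py | isStringATimeSlot
-- ===== SOURCE A (Python) =====
-- def isStringATimeSlot(string):
--
--     timeSlots = ['00:00', '01:00', '02:00', '03:00', '04:00', '05:00', '06:00', '07:00', '08:00', '09:00',
--                 '10:00', '11:00', '12:00', '13:00', '14:00', '15:00', '16:00',
--                 '17:00', '18:00', '19:00', '20:00', '21:00', '22:00', '23:00'
--                 ]
--
--     for timeSlot in timeSlots:
--
--         if string == timeSlot:
--
--             return True
--
--     return False
-- ===== SOURCE B (Python) =====
-- def isStringATimeSlot(string):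
--     # Validate the string's shape directly instead of scanning a 24-element list.
--     if len(string) != 5:
--         return False
--     h1, h2, colon, z1, z2 = string
--     if colon != ':' or z1 != '0' or z2 != '0':
--         return False
--     digits = '0123456789'
--     if h1 not in digits or h2 not in digits:
--         return False
--     return digits.index(h1) * 10 + digits.index(h2) <= 23
-- ===== Notes on version B (the rewrite author's own statement) =====
-- stated objective: simpler
-- what changed: B validates the string's shape in closed form (length 5, ':' at index 2, '00' suffix, two ASCII digit chars forming a value <= 23) instead of comparing the string against each of 24 stored labels.
import Mathlib
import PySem

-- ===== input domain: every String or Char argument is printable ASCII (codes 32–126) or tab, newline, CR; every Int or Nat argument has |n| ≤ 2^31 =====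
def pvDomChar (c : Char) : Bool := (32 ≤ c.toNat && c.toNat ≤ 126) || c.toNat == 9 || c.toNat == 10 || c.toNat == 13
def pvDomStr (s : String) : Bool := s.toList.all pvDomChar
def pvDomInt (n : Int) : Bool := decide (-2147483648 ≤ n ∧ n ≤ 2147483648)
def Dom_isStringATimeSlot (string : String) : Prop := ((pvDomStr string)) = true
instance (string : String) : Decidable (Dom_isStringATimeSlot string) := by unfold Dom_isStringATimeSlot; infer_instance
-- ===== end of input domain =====

-- B replaces A's scan over 24 stored labels by a closed-form shape check of the string (simpler, same behaviour).


-- ===== PORT A =====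
def pvTimeSlots : List String :=
  ["00:00", "01:00", "02:00", "03:00", "04:00", "05:00", "06:00", "07:00", "08:00", "09:00",
   "10:00", "11:00", "12:00", "13:00", "14:00", "15:00", "16:00",
   "17:00", "18:00", "19:00", "20:00", "21:00", "22:00", "23:00"]

-- the 'for timeSlot in timeSlots: if string == timeSlot: return True' loop
def pvTsLoop (string : String) : List String → Bool
  | [] => false
  | t :: ts => if string == t then true else pvTsLoop string ts

def isStringATimeSlot (string : String) : Bool := pvTsLoop string pvTimeSlots

-- ===== PORT B =====
def pvDigits : List Char := ['0', '1', '2', '3', '4', '5', '6', '7', '8', '9']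

def isStringATimeSlot_alt (string : String) : Bool :=
  -- len(string) != 5 / tuple unpacking: match on the five characters
  match string.toList with
  | [h1, h2, colon, z1, z2] =>
    if colon ≠ ':' || z1 ≠ '0' || z2 ≠ '0' then false
    else if !(pvDigits.contains h1) || !(pvDigits.contains h2) then false
    else
      -- digits.index(h1)*10 + digits.index(h2) <= 23; index? is some here since membership was checked
      decide ((PySem.List.index? pvDigits h1).getD 0 * 10 + (PySem.List.index? pvDigits h2).getD 0 ≤ 23)
  | _ => false

-- ===== PRECONDITION & SPEC =====
def Spec_isStringATimeSlot (string : String) (out : Bool) : Prop := out = isStringATimeSlot_alt string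
instance (string : String) (out : Bool) : Decidable (Spec_isStringATimeSlot string out) := by unfold Spec_isStringATimeSlot; infer_instance

-- ===== CLAIM (what is proved, stated in full; the proofs are below) =====
def Claim_equal_isStringATimeSlot : Prop := ∀ (string : String), Dom_isStringATimeSlot string → Spec_isStringATimeSlot string (isStringATimeSlot string)

-- ===== LEMMAS AND PROOFS =====

lemma pvTsLoop_eq_mem (s : String) (l : List String) : pvTsLoop s l = decide (s ∈ l) := by
  induction l with
  | nil => simp [pvTsLoop]
  | cons t ts ih =>
    simp only [pvTsLoop, ih, List.mem_cons]
    by_cases h : s = t <;> simp [h]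

lemma pvAlt_true_mem (s : String) (h : isStringATimeSlot_alt s = true) : s ∈ pvTimeSlots := by
  unfold isStringATimeSlot_alt at h
  rcases hl : s.toList with _ | ⟨h1, _ | ⟨h2, _ | ⟨c3, _ | ⟨z1, _ | ⟨z2, _ | ⟨x, rest⟩⟩⟩⟩⟩⟩ <;>
    rw [hl] at h
  all_goals try exact Bool.noConfusion h
  replace h :
      (if (decide (c3 ≠ ':') || decide (z1 ≠ '0') || decide (z2 ≠ '0')) = true then false
       else if (!pvDigits.contains h1 || !pvDigits.contains h2) = true then false
       else decide ((PySem.List.index? pvDigits h1).getD 0 * 10 +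
              (PySem.List.index? pvDigits h2).getD 0 ≤ 23)) = true := h
  split_ifs at h with hshape hdig
  have hc : c3 = ':' ∧ z1 = '0' ∧ z2 = '0' := by
    by_contra hcon
    apply hshape
    simp only [Bool.or_eq_true, decide_eq_true_eq]
    tauto
  obtain ⟨hc3, hz1, hz2⟩ := hc
  subst hc3; subst hz1; subst hz2
  obtain ⟨hm1, hm2⟩ : h1 ∈ pvDigits ∧ h2 ∈ pvDigits := by simpa using hdig
  have hs : s = String.ofList [h1, h2, ':', '0', '0'] := by
    apply String.toList_inj.mp; rw [hl, String.toList_ofList]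
  subst hs
  fin_cases hm1 <;> fin_cases hm2 <;> first
    | decide
    | (exfalso; revert h; decide)

-- ===== VERDICT (by name: the statement is the Claim_ definition above) =====
theorem isStringATimeSlot_spec : Claim_equal_isStringATimeSlot := by
  intro s _
  unfold Spec_isStringATimeSlot isStringATimeSlot
  rw [pvTsLoop_eq_mem]
  by_cases hm : s ∈ pvTimeSlots
  · fin_cases hm <;> decide
  · simp only [hm, decide_false]
    cases hB : isStringATimeSlot_alt s
    · rfl
    · exact absurd (pvAlt_true_mem s hB) hm
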